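-- pv_equiv track=rewrite | github.com/Camiloaab/Gale_Shapley_app | tools.py | hasse_edges
-- ===== SOURCE A (Python) =====
-- def hasse_edges(letters, leq):
--     covers = []
--     for a in letters:
--         for b in letters:
--             if a == b or not leq[(a, b)]:
--                 continue
--             if any(leq[(a, c)] and leq[(c, b)] for c in letters if c not in (a, b)):
--                 continue
--             covers.append((a, b))
--     return covers
-- ===== SOURCE B (Python) =====
-- def hasse_edges(letters, leq):
--     has_intermediate = set()
--     for c in letters:
--         for a in letters:
--             if a != c and leq[(a, c)]:
--                 for b in letters:
--                     if b != c and leq[(c, b)]: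
--                         has_intermediate.add((a, b))
--     covers = []
--     for a in letters:
--         for b in letters:
--             if a != b and leq[(a, b)] and (a, b) not in has_intermediate:
--                 covers.append((a, b))
--     return covers
-- ===== Notes on version B (the rewrite author's own statement) =====
-- stated objective: alternative
-- what changed: Replaces the per-edge inline 'any' existential scan with a precomputed composed-relation set (triple loop building all pairs that have an intermediate element) followed by a separate filtering pass in the same nested-loop order.
import Mathlib
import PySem

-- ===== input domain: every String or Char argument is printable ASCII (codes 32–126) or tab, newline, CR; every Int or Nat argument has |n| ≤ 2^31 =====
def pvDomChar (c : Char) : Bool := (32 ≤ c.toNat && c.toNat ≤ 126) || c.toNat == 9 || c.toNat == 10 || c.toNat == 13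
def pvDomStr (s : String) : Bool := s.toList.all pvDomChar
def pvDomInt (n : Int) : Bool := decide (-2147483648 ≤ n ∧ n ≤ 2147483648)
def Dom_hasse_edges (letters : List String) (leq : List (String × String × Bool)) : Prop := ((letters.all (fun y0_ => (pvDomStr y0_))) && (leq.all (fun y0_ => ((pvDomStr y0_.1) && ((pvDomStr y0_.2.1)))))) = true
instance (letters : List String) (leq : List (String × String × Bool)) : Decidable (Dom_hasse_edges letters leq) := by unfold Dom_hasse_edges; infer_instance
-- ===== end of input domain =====

-- B builds the composed relation once as a set and then filters in a second pass (same output order);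
-- the proof shows the precomputed set membership coincides with A's inline existential scan.

-- dict lookup leq[(a,b)]: first matching key; `false` stands for the KeyError case, which Pre_ excludes
def pyleq (leq : List (String × String × Bool)) (a b : String) : Bool :=
  match leq with
  | [] => false
  | (x, y, v) :: rest => if x == a && y == b then v else pyleq rest a b

-- ===== PORT A =====
def hasse_edges (letters : List String) (leq : List (String × String × Bool)) : List (String × String) :=
  letters.foldl (fun covers a =>
    letters.foldl (fun covers b =>
      if (a == b) || !(pyleq leq a b) then covers
      else if letters.any (fun c => !(c == a || c == b) && pyleq leq a c && pyleq leq c b) then covers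
      else covers ++ [(a, b)]) covers) []

-- ===== PORT B =====
def hasse_edges_alt (letters : List String) (leq : List (String × String × Bool)) : List (String × String) :=
  let inter : PySem.Set (String × String) :=
    letters.foldl (fun s c =>
      letters.foldl (fun s a =>
        if (a != c) && pyleq leq a c then
          letters.foldl (fun s b =>
            if (b != c) && pyleq leq c b then PySem.Set.add s (a, b) else s) s
        else s) s) PySem.Set.empty
  letters.foldl (fun covers a =>
    letters.foldl (fun covers b =>
      if (a != b) && pyleq leq a b && !(PySem.Set.contains inter (a, b)) then covers ++ [(a, b)]
      else covers) covers) []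

-- ===== PRECONDITION & SPEC =====
-- Pre_ excludes leq missing some ordered pair of distinct letters: there the Python A raises KeyError.
def Pre_hasse_edges (letters : List String) (leq : List (String × String × Bool)) : Prop :=
  ∀ a ∈ letters, ∀ b ∈ letters, a ≠ b → (leq.any (fun e => e.1 == a && e.2.1 == b)) = true
instance (letters : List String) (leq : List (String × String × Bool)) : Decidable (Pre_hasse_edges letters leq) := by unfold Pre_hasse_edges; infer_instance
def pvWitness_hasse_edges : List String × (List (String × String × Bool)) :=
  (["a", "b"], [("a", "b", true), ("b", "a", false)])

def Spec_hasse_edges (letters : List String) (leq : List (String × String × Bool)) (out : List (String × String)) : Prop := out = hasse_edges_alt letters leq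
instance (letters : List String) (leq : List (String × String × Bool)) (out : List (String × String)) : Decidable (Spec_hasse_edges letters leq out) := by unfold Spec_hasse_edges; infer_instance

-- ===== CLAIM (what is proved, stated in full; the proofs are below) =====
def Claim_equal_hasse_edges : Prop := ∀ (letters : List String) (leq : List (String × String × Bool)), Dom_hasse_edges letters leq → Pre_hasse_edges letters leq → Spec_hasse_edges letters leq (hasse_edges letters leq)

-- ===== LEMMAS AND PROOFS =====

-- a fold whose step only ever adds elements satisfying Q: membership characterisation
theorem mem_foldl_of_step {γ β : Type} (F : PySem.Set γ → β → PySem.Set γ)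
    (Q : β → γ → Prop) (hF : ∀ s b x, x ∈ F s b ↔ x ∈ s ∨ Q b x) :
    ∀ (M : List β) (s : PySem.Set γ) (x : γ),
      x ∈ M.foldl F s ↔ x ∈ s ∨ ∃ b ∈ M, Q b x := by
  intro M
  induction M with
  | nil => simp
  | cons m M ih =>
      intro s x
      simp only [List.foldl_cons, ih, hF, List.mem_cons]
      constructor
      · rintro ((h | h) | ⟨b, hb, hq⟩)
        · exact Or.inl h
        · exact Or.inr ⟨m, Or.inl rfl, h⟩
        · exact Or.inr ⟨b, Or.inr hb, hq⟩
      · rintro (h | ⟨b, (rfl | hb), hq⟩)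
        · exact Or.inl (Or.inl h)
        · exact Or.inl (Or.inr hq)
        · exact Or.inr ⟨b, hb, hq⟩

-- two-level fold congruence: equal bodies on members give equal folds
theorem foldl2_congr {α β : Type} (L M : List β) (f g : β → β → List α → List α)
    (h : ∀ a ∈ L, ∀ b ∈ M, ∀ acc, f a b acc = g a b acc) :
    ∀ acc, L.foldl (fun cs a => M.foldl (fun cs b => f a b cs) cs) acc
         = L.foldl (fun cs a => M.foldl (fun cs b => g a b cs) cs) acc := by
  induction L with
  | nil => intro acc; rfl
  | cons a L ih =>
      intro acc
      simp only [List.foldl_cons]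
      have hinner : ∀ (M' : List β), (∀ b ∈ M', ∀ acc, f a b acc = g a b acc) →
          ∀ acc, M'.foldl (fun cs b => f a b cs) acc = M'.foldl (fun cs b => g a b cs) acc := by
        intro M'
        induction M' with
        | nil => intro _ acc; rfl
        | cons b M' ih2 =>
            intro hb acc
            simp only [List.foldl_cons, hb b (List.mem_cons_self ..)]
            exact ih2 (fun b' hb' => hb b' (List.mem_cons_of_mem _ hb')) _
      rw [hinner M (fun b hb => h a (List.mem_cons_self ..) b hb)]
      exact ih (fun a' ha' => h a' (List.mem_cons_of_mem _ ha')) _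

-- membership in B's precomputed set
theorem mem_inter (letters : List String) (leq : List (String × String × Bool)) (x : String × String) :
    x ∈ (letters.foldl (fun s c =>
      letters.foldl (fun s a =>
        if (a != c) && pyleq leq a c then
          letters.foldl (fun s b =>
            if (b != c) && pyleq leq c b then PySem.Set.add s (a, b) else s) s
        else s) s) (PySem.Set.empty : PySem.Set (String × String)))
    ↔ ∃ c ∈ letters, ∃ a ∈ letters, ((a != c) && pyleq leq a c) = true ∧
        ∃ b ∈ letters, ((b != c) && pyleq leq c b) = true ∧ x = (a, b) := by
  have h3 : ∀ (c a : String) (s : PySem.Set (String × String)) (x : String × String),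
      x ∈ letters.foldl (fun s b => if (b != c) && pyleq leq c b then PySem.Set.add s (a, b) else s) s
      ↔ x ∈ s ∨ ∃ b ∈ letters, ((b != c) && pyleq leq c b) = true ∧ x = (a, b) := by
    intro c a
    refine mem_foldl_of_step _ _ (fun s b x => ?_) letters
    by_cases hb : ((b != c) && pyleq leq c b) = true
    · rw [if_pos hb]; simp [PySem.Set.mem_add, hb]
    · simp [hb]
  have h2 : ∀ (c : String) (s : PySem.Set (String × String)) (x : String × String),
      x ∈ letters.foldl (fun s a =>
        if (a != c) && pyleq leq a c then
          letters.foldl (fun s b =>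
            if (b != c) && pyleq leq c b then PySem.Set.add s (a, b) else s) s
        else s) s
      ↔ x ∈ s ∨ ∃ a ∈ letters, ((a != c) && pyleq leq a c) = true ∧
          ∃ b ∈ letters, ((b != c) && pyleq leq c b) = true ∧ x = (a, b) := by
    intro c
    refine mem_foldl_of_step _ _ (fun s a x => ?_) letters
    by_cases ha : ((a != c) && pyleq leq a c) = true
    · rw [if_pos ha, h3 c a s x]; simp [ha]
    · simp [ha]
  have h1 := mem_foldl_of_step
    (fun s c =>
      letters.foldl (fun s a =>
        if (a != c) && pyleq leq a c then
          letters.foldl (fun s b =>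
            if (b != c) && pyleq leq c b then PySem.Set.add s (a, b) else s) s
        else s) s)
    (fun c x => ∃ a ∈ letters, ((a != c) && pyleq leq a c) = true ∧
        ∃ b ∈ letters, ((b != c) && pyleq leq c b) = true ∧ x = (a, b))
    (fun s c x => h2 c s x) letters PySem.Set.empty x
  simpa [PySem.Set.empty] using h1

-- ===== VERDICT (by name: the statement is the Claim_ definition above) =====
theorem hasse_edges_spec : Claim_equal_hasse_edges := by
  intro letters leq _ _
  unfold Spec_hasse_edges hasse_edges hasse_edges_alt
  refine (foldl2_congr letters letters _ _ ?_ []).symm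
  intro a ha b hb acc
  by_cases hab : a = b
  · subst hab; simp
  · have hne : (a != b) = true := by simp [bne, hab]
    by_cases hl : pyleq leq a b = true
    · have hiff : (PySem.Set.contains
          (letters.foldl (fun s c =>
            letters.foldl (fun s a =>
              if (a != c) && pyleq leq a c then
                letters.foldl (fun s b =>
                  if (b != c) && pyleq leq c b then PySem.Set.add s (a, b) else s) s
              else s) s) PySem.Set.empty) (a, b)) =
          letters.any (fun c => !(c == a || c == b) && pyleq leq a c && pyleq leq c b) := by
        rcases Bool.eq_false_or_eq_true (letters.any fun c => !(c == a || c == b) && pyleq leq a c && pyleq leq c b) with hany | hany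
        · rw [hany, PySem.Set.contains_iff, mem_inter]
          rw [List.any_eq_true] at hany
          obtain ⟨c, hc, hcond⟩ := hany
          simp only [Bool.and_eq_true, Bool.not_eq_true', Bool.or_eq_false_iff,
            beq_eq_false_iff_ne, ne_eq] at hcond
          exact ⟨c, hc, a, ha,
                 by rw [Bool.and_eq_true, bne_iff_ne]; exact ⟨fun h => hcond.1.1.1 h.symm, hcond.1.2⟩,
                 b, hb,
                 by rw [Bool.and_eq_true, bne_iff_ne]; exact ⟨fun h => hcond.1.1.2 h.symm, hcond.2⟩, rfl⟩
        · rw [hany, ← Bool.not_eq_true, PySem.Set.contains_iff, mem_inter]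
          rintro ⟨c, hc, a', ha', hac, b', hb', hcb, heq⟩
          obtain ⟨rfl, rfl⟩ : a' = a ∧ b' = b := by
            constructor <;> · injection heq with h1 h2; simp_all
          rw [List.any_eq_false] at hany
          have := hany c hc
          simp only [Bool.and_eq_true, bne_iff_ne, ne_eq] at hac hcb
          simp only [Bool.and_eq_true, Bool.not_eq_true', Bool.or_eq_false_iff, beq_eq_false_iff_ne,
            ne_eq, not_and] at this
          exact this ⟨⟨fun h => hac.1 h.symm, fun h => hcb.1 h.symm⟩, hac.2⟩ hcb.2
      rw [hiff]
      rw [if_neg (by simp [hab, hl] : ¬ ((a == b) || !(pyleq leq a b)) = true)]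
      rcases Bool.eq_false_or_eq_true (letters.any fun c => !(c == a || c == b) && pyleq leq a c && pyleq leq c b) with h | h <;>
        rw [h] <;> simp [hne, hl]
    · simp [hl, hne]
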